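-- pv_equiv track=rewrite | github.com/joey-mcadams/code_samples | doors/open_doors.py | open_doors
-- ===== SOURCE A (Python) =====
-- def open_doors(step, open_doors_list):
--     for i in range(1, 101): # Door to toggle
--         if i % step == 0:
--             if i in open_doors_list:
--                 open_doors_list.remove(i)
--             else:
--                 open_doors_list.append(i)
--
--     return open_doors_list
-- ===== SOURCE B (Python) =====
-- def open_doors(step, open_doors_list):
--     # One pass over the list with a pending-set of the multiples of step in 1..100:
--     # drop the first occurrence of each present multiple, then append the absent
--     # multiples in increasing order.  Mutates open_doors_list in place like A.
--     toggled = [i for i in range(1, 101) if i % step == 0]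
--     pending = set(toggled)
--     result = []
--     for x in open_doors_list:
--         if x in pending:
--             pending.discard(x)
--         else:
--             result.append(x)
--     for m in toggled:
--         if m in pending:
--             result.append(m)
--     open_doors_list[:] = result
--     return open_doors_list
-- ===== Notes on version B (the rewrite author's own statement) =====
-- stated objective: alternative
-- what changed: Instead of 100 toggle rounds each scanning/removing from the list, B computes the multiples once, makes a single pass over the list with a pending set (dropping the first occurrence of each present multiple), then appends the still-pending multiples in increasing order.
import Mathlib
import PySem

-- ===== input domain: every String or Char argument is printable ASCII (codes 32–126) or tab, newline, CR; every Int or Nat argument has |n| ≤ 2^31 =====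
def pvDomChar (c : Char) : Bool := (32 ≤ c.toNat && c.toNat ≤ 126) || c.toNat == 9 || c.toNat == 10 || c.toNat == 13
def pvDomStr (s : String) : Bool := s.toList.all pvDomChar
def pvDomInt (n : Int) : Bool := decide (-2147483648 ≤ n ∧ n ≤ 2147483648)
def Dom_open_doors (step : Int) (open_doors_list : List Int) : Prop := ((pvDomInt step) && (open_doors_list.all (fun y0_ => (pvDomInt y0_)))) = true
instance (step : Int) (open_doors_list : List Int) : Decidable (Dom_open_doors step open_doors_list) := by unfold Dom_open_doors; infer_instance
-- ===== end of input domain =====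

-- B replaces A's 100 toggle rounds over the list by one pass with a pending set of the
-- multiples; both mutate open_doors_list in place in Python, equivalence is about the return value.


-- ===== PORT A =====
def open_doors (step : Int) (open_doors_list : List Int) : List Int :=
  (PySem.List.pyRange 1 101 1).foldl
    (fun s i =>
      if PySem.Int.mod i step == 0 then
        if s.contains i then (PySem.List.remove? s i).getD s
        else s ++ [i]
      else s)
    open_doors_list

-- ===== PORT B =====
def open_doors_alt (step : Int) (open_doors_list : List Int) : List Int :=
  let toggled := (PySem.List.pyRange 1 101 1).filter (fun i => PySem.Int.mod i step == 0)
  let p := open_doors_list.foldl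
    (fun (p : List Int × PySem.Set Int) x =>
      if p.2.contains x then (p.1, p.2.discard x) else (p.1 ++ [x], p.2))
    ([], PySem.Set.ofList toggled)
  toggled.foldl (fun r m => if p.2.contains m then r ++ [m] else r) p.1

-- ===== PRECONDITION & SPEC =====
-- Pre_ excludes exactly step = 0, where Python's i % step raises ZeroDivisionError (in A and B alike).
def Pre_open_doors (step : Int) (open_doors_list : List Int) : Prop := step ≠ 0
instance (step : Int) (open_doors_list : List Int) : Decidable (Pre_open_doors step open_doors_list) := by unfold Pre_open_doors; infer_instance
def pvWitness_open_doors : Int × List Int := (3, [5, 9, 100])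

def Spec_open_doors (step : Int) (open_doors_list : List Int) (out : List Int) : Prop := out = open_doors_alt step open_doors_list
instance (step : Int) (open_doors_list : List Int) (out : List Int) : Decidable (Spec_open_doors step open_doors_list out) := by unfold Spec_open_doors; infer_instance

-- ===== CLAIM (what is proved, stated in full; the proofs are below) =====
def Claim_equal_open_doors : Prop := ∀ (step : Int) (open_doors_list : List Int), Dom_open_doors step open_doors_list → Pre_open_doors step open_doors_list → Spec_open_doors step open_doors_list (open_doors step open_doors_list)

-- ===== LEMMAS AND PROOFS =====

-- the inner toggle step of A
def pvG (s : List Int) (m : Int) : List Int :=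
  if s.contains m then (PySem.List.remove? s m).getD s else s ++ [m]

-- result of B's pass over xs with pending set P: kept elements
def pvDrop : List Int → List Int → List Int
  | [], _ => []
  | x :: xs, P => if P.contains x then pvDrop xs (P.filter (fun y => !(y == x))) else x :: pvDrop xs P

-- result of B's pass: remaining pending set
def pvPend : List Int → List Int → List Int
  | [], P => P
  | x :: xs, P => if P.contains x then pvPend xs (P.filter (fun y => !(y == x))) else pvPend xs P

theorem pvDrop_nil (xs : List Int) : pvDrop xs [] = xs := by
  induction xs with
  | nil => rfl
  | cons x xs ih => simp [pvDrop, ih]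

theorem pvPend_eq_filter (xs : List Int) : ∀ P : List Int,
    pvPend xs P = P.filter (fun v => !(xs.contains v)) := by
  induction xs with
  | nil => intro P; simp [pvPend]
  | cons x xs ih =>
    intro P
    simp only [pvPend]
    by_cases h : P.contains x
    · simp only [h, if_pos, ih, List.filter_filter]
      apply List.filter_congr
      intro v _
      by_cases hv : v = x <;> simp [hv]
    · simp only [h, if_neg, Bool.not_eq_true, ih]
      apply List.filter_congr
      intro v hv
      have hvx : v ≠ x := by rintro rfl; exact h (List.elem_eq_true_of_mem hv)
      simp [hvx]

theorem pvDrop_erase (m : Int) : ∀ (xs P : List Int), m ∈ xs → m ∉ P →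
    pvDrop xs (m :: P) = pvDrop (xs.erase m) P := by
  intro xs
  induction xs with
  | nil => intro P h; exact absurd h (List.not_mem_nil)
  | cons x xs ih =>
    intro P hm hmP
    by_cases hx : x = m
    · subst hx
      have hc : (x :: P).contains x = true := by simp
      simp only [pvDrop, hc, if_pos, List.erase_cons_head]
      have hfc : (x :: P).filter (fun y => !(y == x)) = P.filter (fun y => !(y == x)) := by
        simp [List.filter_cons]
      have hP : P.filter (fun y => !(y == x)) = P := by
        apply List.filter_eq_self.mpr
        intro a ha
        have : a ≠ x := by rintro rfl; exact hmP ha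
        simp [this]
      rw [hfc, hP]
    · have hm' : m ∈ xs := by
        rcases List.mem_cons.mp hm with h | h
        · exact absurd h.symm hx
        · exact h
      have herase : (x :: xs).erase m = x :: xs.erase m := List.erase_cons_tail (by simp [hx])
      rw [herase]
      have hmx : ¬ ((m == x) = true) := by
        simp only [beq_iff_eq]
        exact fun h => hx h.symm
      by_cases hPx : P.contains x
      · have hc : (m :: P).contains x = true := by
          simp only [List.contains_cons, hPx, Bool.or_true]
        have hfc : (m :: P).filter (fun y => !(y == x)) = m :: P.filter (fun y => !(y == x)) := by
          simp [List.filter_cons, hmx]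
        simp only [pvDrop, hc, if_pos, hfc, hPx]
        exact ih (P.filter (fun y => !(y == x))) hm'
          (fun hmem => hmP (List.mem_of_mem_filter hmem))
      · have hc : (m :: P).contains x = false := by
          simp only [List.contains_cons, hPx, Bool.or_false]
          simp [hx]
        have hxP : x ∉ P := fun hh => hPx (List.elem_eq_true_of_mem hh)
        simp [pvDrop, hx, hxP, ih P hm' hmP]

theorem pvDrop_append (m : Int) : ∀ (xs P : List Int), m ∉ P →
    pvDrop (xs ++ [m]) P = pvDrop xs P ++ [m] := by
  intro xs
  induction xs with
  | nil =>
    intro P hmP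
    simp [pvDrop, hmP]
  | cons x xs ih =>
    intro P hmP
    simp only [List.cons_append, pvDrop]
    by_cases h : P.contains x
    · simp only [h, if_pos]
      rw [ih _ (by intro hmem; exact hmP (List.mem_of_mem_filter hmem))]
    · have hxP : x ∉ P := fun hh => h (List.elem_eq_true_of_mem hh)
      simp [hxP, ih P hmP]

theorem pvDrop_notmem (m : Int) : ∀ (xs P : List Int), m ∉ xs →
    pvDrop xs (m :: P) = pvDrop xs P := by
  intro xs
  induction xs with
  | nil => intro P _; rfl
  | cons x xs ih =>
    intro P hm
    have hxm : x ≠ m := by rintro rfl; exact hm (List.mem_cons_self)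
    have hm' : m ∉ xs := fun h => hm (List.mem_cons_of_mem _ h)
    have hmx : ¬ ((m == x) = true) := by
      simp only [beq_iff_eq]
      exact fun h => hxm h.symm
    have hc : (m :: P).contains x = P.contains x := by
      simp only [List.contains_cons]
      have : (x == m) = false := by simp [hxm]
      simp [this]
    simp only [pvDrop, hc]
    by_cases h : P.contains x
    · have hfc : (m :: P).filter (fun y => !(y == x)) = m :: P.filter (fun y => !(y == x)) := by
        simp [List.filter_cons, hmx]
      simp only [h, if_pos, hfc]
      exact ih _ hm'
    · have hxP : x ∉ P := fun hh => h (List.elem_eq_true_of_mem hh)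
      simp [hxP, ih P hm']

-- A's folded toggles over a duplicate-free list M equal B's one-pass characterisation
theorem pvMain : ∀ (M : List Int), M.Nodup → ∀ xs : List Int,
    M.foldl pvG xs = pvDrop xs M ++ M.filter (fun v => !(xs.contains v)) := by
  intro M
  induction M with
  | nil => intro _ xs; simp [pvDrop_nil]
  | cons m M ih =>
    intro hnd xs
    have hmM : m ∉ M := (List.nodup_cons.mp hnd).1
    have hM : M.Nodup := (List.nodup_cons.mp hnd).2
    simp only [List.foldl_cons]
    by_cases hm : xs.contains m
    · have hmem : m ∈ xs := List.mem_of_elem_eq_true hm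
      have hg : pvG xs m = xs.erase m := by
        simp [pvG, hm, hmem, PySem.List.remove?_eq_some_erase xs m hmem]
      rw [hg, ih hM (xs.erase m), ← pvDrop_erase m xs M hmem hmM]
      have hfil : M.filter (fun v => !((xs.erase m).contains v)) = M.filter (fun v => !(xs.contains v)) := by
        apply List.filter_congr
        intro v hv
        have hvm : v ≠ m := by rintro rfl; exact hmM hv
        have heq : v ∈ xs.erase m ↔ v ∈ xs := List.mem_erase_of_ne hvm
        simp [heq]
      rw [hfil]
      have : (m :: M).filter (fun v => !(xs.contains v)) = M.filter (fun v => !(xs.contains v)) := by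
        simp [List.filter_cons, hmem]
      rw [this]
    · have hnmem : m ∉ xs := fun h => hm (List.elem_eq_true_of_mem h)
      have hg : pvG xs m = xs ++ [m] := by simp [pvG, hm, hnmem]
      rw [hg, ih hM (xs ++ [m]), pvDrop_append m xs M hmM, pvDrop_notmem m xs M hnmem]
      have hfil : M.filter (fun v => !((xs ++ [m]).contains v)) = M.filter (fun v => !(xs.contains v)) := by
        apply List.filter_congr
        intro v hv
        have hvm : v ≠ m := by rintro rfl; exact hmM hv
        simp [List.contains_append, hvm]
      rw [hfil]
      have : (m :: M).filter (fun v => !(xs.contains v)) = m :: M.filter (fun v => !(xs.contains v)) := by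
        simp [List.filter_cons, hnmem]
      rw [this, List.append_assoc]
      rfl

-- A's guarded fold over a range is the fold of pvG over the filtered range
theorem pvFilterFold (c : Int → Bool) : ∀ (l : List Int) (s : List Int),
    l.foldl (fun s i => if c i then pvG s i else s) s = (l.filter c).foldl pvG s := by
  intro l
  induction l with
  | nil => intro s; rfl
  | cons x l ih =>
    intro s
    by_cases h : c x <;> simp [List.filter_cons, h, ih]

-- B's pass computes (pvDrop, pvPend)
theorem pvPassFold : ∀ (xs r P : List Int),
    xs.foldl (fun (p : List Int × PySem.Set Int) x =>
        if p.2.contains x then (p.1, p.2.discard x) else (p.1 ++ [x], p.2)) (r, P)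
      = (r ++ pvDrop xs P, pvPend xs P) := by
  intro xs
  induction xs with
  | nil => intro r P; simp [pvDrop, pvPend]
  | cons x xs ih =>
    intro r P
    rw [List.foldl_cons]
    by_cases h : P.contains x
    · have hc : PySem.Set.contains P x = true := h
      rw [if_pos hc, show PySem.Set.discard P x = P.filter (fun y => !(y == x)) from rfl, ih]
      have hxP : x ∈ P := List.mem_of_elem_eq_true h
      simp [pvDrop, pvPend, hxP]
    · have hc : ¬ (PySem.Set.contains P x = true) := h
      rw [if_neg hc, ih]
      have hxP : x ∉ P := fun hh => h (List.elem_eq_true_of_mem hh)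
      simp [pvDrop, pvPend, hxP, List.append_assoc]

-- B's final append loop
theorem pvAppendFold (Q : PySem.Set Int) : ∀ (M r : List Int),
    M.foldl (fun r m => if Q.contains m then r ++ [m] else r) r
      = r ++ M.filter (fun m => Q.contains m) := by
  intro M
  induction M with
  | nil => intro r; simp
  | cons m M ih =>
    intro r
    rw [List.foldl_cons, List.filter_cons]
    by_cases h : Q.contains m
    · have hmQ : m ∈ Q := List.mem_of_elem_eq_true h
      rw [if_pos h, ih]; simp [hmQ, List.append_assoc]
    · have hmQ : m ∉ Q := fun hh => h (List.elem_eq_true_of_mem hh)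
      rw [if_neg h, ih]; simp [hmQ]

-- set(toggled) is toggled itself, since toggled has no duplicates
theorem pvOfListNodup : ∀ (l acc : List Int), (l ++ acc.reverse).Nodup →
    l.foldl PySem.Set.add acc = acc ++ l := by
  intro l
  induction l with
  | nil => intro acc _; simp
  | cons x l ih =>
    intro acc hnd
    have hnd' : (x :: (l ++ acc.reverse)).Nodup := by simpa using hnd
    have hx : x ∉ acc := fun h =>
      (List.nodup_cons.mp hnd').1 (List.mem_append.mpr (Or.inr (List.mem_reverse.mpr h)))
    have hadd : PySem.Set.add acc x = acc ++ [x] := by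
      simp [PySem.Set.add, PySem.Set.contains, hx]
    simp only [List.foldl_cons, hadd]
    have hnd2 : (l ++ (acc ++ [x]).reverse).Nodup := by
      have h2 : (l ++ x :: acc.reverse).Nodup := (List.perm_middle.nodup_iff).mpr hnd'
      simpa using h2
    rw [ih (acc ++ [x]) hnd2]
    simp

theorem pvToggledNodup (step : Int) :
    ((PySem.List.pyRange 1 101 1).filter (fun i => PySem.Int.mod i step == 0)).Nodup :=
  (PySem.List.nodup_pyRange_one 1 101).filter _

-- ===== VERDICT (by name: the statement is the Claim_ definition above) =====
theorem open_doors_spec : Claim_equal_open_doors := by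
  intro step xs _ _
  show open_doors step xs = open_doors_alt step xs
  have hnd : ((PySem.List.pyRange 1 101 1).filter (fun i => PySem.Int.mod i step == 0)).Nodup :=
    pvToggledNodup step
  have hset : PySem.Set.ofList ((PySem.List.pyRange 1 101 1).filter (fun i => PySem.Int.mod i step == 0))
      = (PySem.List.pyRange 1 101 1).filter (fun i => PySem.Int.mod i step == 0) := by
    simpa [PySem.Set.ofList, PySem.Set.empty] using
      pvOfListNodup ((PySem.List.pyRange 1 101 1).filter (fun i => PySem.Int.mod i step == 0)) []
        (by simpa using hnd)
  have hA : open_doors step xs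
      = ((PySem.List.pyRange 1 101 1).filter (fun i => PySem.Int.mod i step == 0)).foldl pvG xs :=
    pvFilterFold (fun i => PySem.Int.mod i step == 0) (PySem.List.pyRange 1 101 1) xs
  have hB : open_doors_alt step xs
      = ((PySem.List.pyRange 1 101 1).filter (fun i => PySem.Int.mod i step == 0)).foldl
          (fun r m =>
            if ((xs.foldl (fun (p : List Int × PySem.Set Int) x =>
                  if p.2.contains x then (p.1, p.2.discard x) else (p.1 ++ [x], p.2))
                ([], PySem.Set.ofList ((PySem.List.pyRange 1 101 1).filter (fun i => PySem.Int.mod i step == 0)))).2).contains m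
            then r ++ [m] else r)
          ((xs.foldl (fun (p : List Int × PySem.Set Int) x =>
                if p.2.contains x then (p.1, p.2.discard x) else (p.1 ++ [x], p.2))
              ([], PySem.Set.ofList ((PySem.List.pyRange 1 101 1).filter (fun i => PySem.Int.mod i step == 0)))).1) := rfl
  rw [hA, hB, hset,
    pvPassFold xs [] ((PySem.List.pyRange 1 101 1).filter (fun i => PySem.Int.mod i step == 0))]
  rw [pvMain ((PySem.List.pyRange 1 101 1).filter (fun i => PySem.Int.mod i step == 0)) hnd xs]
  rw [pvAppendFold]
  simp only [List.nil_append]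
  congr 1
  rw [pvPend_eq_filter]
  apply List.filter_congr
  intro m hm
  have hcont : PySem.Set.contains
      (((PySem.List.pyRange 1 101 1).filter (fun i => PySem.Int.mod i step == 0)).filter
        (fun v => !(xs.contains v))) m = !(xs.contains m) := by
    by_cases h : m ∈ xs
    · simp [PySem.Set.contains, h]
    · have h2 := List.mem_filter.mp hm
      have h3 := PySem.List.mem_pyRange_one.mp h2.1
      have h4 : PySem.Int.mod m step = 0 := by simpa using h2.2
      simp [PySem.Set.contains, h, h3.1, h3.2, h4]
  exact hcont.symm
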